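-- pv_equiv track=rewrite | github.com/sergei-orl/TM_Analysis | create_card_summary_csv.py | collect_all_unique_fields
-- ===== SOURCE A (Python) =====
-- from typing import Dict, Any, Set, List
--
-- def collect_all_unique_fields(card_analyses: List[Dict[str, Any]]) -> Dict[str, Set[str]]:
--     """
--     Collect all unique values for dictionary fields across all cards.
--
--     Args:
--         card_analyses: List of card analysis dictionaries
--
--     Returns:
--         Dictionary mapping field names to sets of unique values
--     """
--     unique_fields = {
--         'draw_methods': set(),
--         'seen_methods': set(),
--         'other_stats': set(),
--         'keep_rates': set()
--     }
--
--     for card in card_analyses: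
--         # Collect draw_methods
--         if 'draw_methods' in card:
--             unique_fields['draw_methods'].update(card['draw_methods'].keys())
--
--         # Collect seen_methods
--         if 'seen_methods' in card:
--             unique_fields['seen_methods'].update(card['seen_methods'].keys())
--
--         # Collect other_stats
--         if 'other_stats' in card:
--             unique_fields['other_stats'].update(card['other_stats'].keys())
--
--         # Collect keep_rates
--         if 'keep_rates' in card:
--             unique_fields['keep_rates'].update(card['keep_rates'].keys())
--
--     return unique_fields
-- ===== SOURCE B (Python) =====
-- def collect_all_unique_fields(card_analyses):
--     """Two staged passes over a flat intermediate: flatten all cards into one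
--     stream of (field, key) pairs restricted to the four known fields, dedup that
--     stream once, then group the deduplicated pairs by field."""
--     fields = ('draw_methods', 'seen_methods', 'other_stats', 'keep_rates')
--     pairs = list(dict.fromkeys(
--         (f, k)
--         for card in card_analyses
--         for f in fields
--         if f in card
--         for k in card[f]
--     ))
--     return {f: {k for g, k in pairs if g == f} for f in fields}
-- ===== Notes on version B (the rewrite author's own statement) =====
-- stated objective: alternative
-- what changed: Instead of maintaining four per-field sets while scanning the cards, B flattens all cards into one intermediate stream of (field, key) pairs, deduplicates that single stream once with dict.fromkeys, and then groups the deduplicated pairs by field.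
import Mathlib
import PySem

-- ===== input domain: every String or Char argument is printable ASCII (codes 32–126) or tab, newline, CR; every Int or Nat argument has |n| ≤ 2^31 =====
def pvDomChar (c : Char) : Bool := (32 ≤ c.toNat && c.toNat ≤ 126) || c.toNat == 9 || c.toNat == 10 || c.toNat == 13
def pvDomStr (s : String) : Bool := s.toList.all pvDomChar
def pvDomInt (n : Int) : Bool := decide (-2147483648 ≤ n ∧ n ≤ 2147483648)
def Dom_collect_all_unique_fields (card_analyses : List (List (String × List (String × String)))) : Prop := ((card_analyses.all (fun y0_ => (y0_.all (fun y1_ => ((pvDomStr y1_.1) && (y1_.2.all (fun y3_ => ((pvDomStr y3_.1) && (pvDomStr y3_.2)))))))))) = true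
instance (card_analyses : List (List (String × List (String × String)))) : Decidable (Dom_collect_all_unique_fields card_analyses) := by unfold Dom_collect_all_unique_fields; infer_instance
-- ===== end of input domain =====

-- B replaces A's single pass with four per-field set accumulators by two staged passes over a
-- flat intermediate: flatten all cards into one (field, key) pair stream, dedup it once, then group by field.


-- ===== PORT A =====
-- card[f] / 'f in card' on the assoc-list model of a Python dict: first match
def pvLookup (card : List (String × List (String × String))) (f : String) :
    Option (List (String × String)) :=
  match card with
  | [] => none
  | (k, v) :: rest => if k == f then some v else pvLookup rest f

-- one branch of A's loop body: if f in card: unique_fields[f].update(card[f].keys())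
def pvStepField (uf : PySem.Dict String (PySem.Set String))
    (card : List (String × List (String × String))) (f : String) :
    PySem.Dict String (PySem.Set String) :=
  match pvLookup card f with
  | some d => uf.modify f [] (fun s => PySem.Set.update s (d.map Prod.fst))
  | none => uf

def collect_all_unique_fields (card_analyses : List (List (String × List (String × String)))) : List (String × List String) :=
  let init : PySem.Dict String (PySem.Set String) :=
    PySem.Dict.mk [("draw_methods", PySem.Set.empty), ("seen_methods", PySem.Set.empty),
                   ("other_stats", PySem.Set.empty), ("keep_rates", PySem.Set.empty)]
  let final := card_analyses.foldl (fun uf card =>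
    let uf := pvStepField uf card "draw_methods"
    let uf := pvStepField uf card "seen_methods"
    let uf := pvStepField uf card "other_stats"
    pvStepField uf card "keep_rates") init
  final.items

-- ===== PORT B =====
-- the tuple 'fields'
def pvFields : List String := ["draw_methods", "seen_methods", "other_stats", "keep_rates"]

-- one card's contribution to the pair stream for one field: [(f, k) for k in card[f]] if f in card else []
def pvChunk (card : List (String × List (String × String))) (f : String) :
    List (String × String) :=
  match pvLookup card f with
  | some d => d.map (fun kv => (f, kv.1))
  | none => []

-- pairs = list(dict.fromkeys((f, k) for card in cards for f in fields if f in card for k in card[f]))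
def pvPairs (cards : List (List (String × List (String × String)))) :
    List (String × String) :=
  PySem.List.dedup (cards.flatMap (fun card => pvFields.flatMap (fun f => pvChunk card f)))

-- {k for g, k in pairs if g == f}
def pvGroup (pairs : List (String × String)) (f : String) : PySem.Set String :=
  pairs.foldl (fun s p => if p.1 == f then PySem.Set.add s p.2 else s) PySem.Set.empty

def collect_all_unique_fields_alt (card_analyses : List (List (String × List (String × String)))) : List (String × List String) :=
  pvFields.map (fun f => (f, pvGroup (pvPairs card_analyses) f))

-- ===== PRECONDITION & SPEC =====
def Spec_collect_all_unique_fields (card_analyses : List (List (String × List (String × String)))) (out : List (String × List String)) : Prop := out = collect_all_unique_fields_alt card_analyses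
instance (card_analyses : List (List (String × List (String × String)))) (out : List (String × List String)) : Decidable (Spec_collect_all_unique_fields card_analyses out) := by unfold Spec_collect_all_unique_fields; infer_instance

-- ===== CLAIM =====
def Claim_equal_collect_all_unique_fields : Prop := ∀ (card_analyses : List (List (String × List (String × String)))), Dom_collect_all_unique_fields card_analyses → Spec_collect_all_unique_fields card_analyses (collect_all_unique_fields card_analyses)

-- ===== LEMMAS AND PROOFS =====

-- the keys card[f].keys() (empty when f not in card)
def pvKeysOf (card : List (String × List (String × String))) (f : String) : List String :=
  match pvLookup card f with
  | some d => d.map Prod.fst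
  | none => []

-- the full key stream of one field across all cards
def pvKeyStream (cards : List (List (String × List (String × String)))) (f : String) :
    List String :=
  cards.flatMap (fun c => pvKeysOf c f)

-- A's per-field fold, started from an arbitrary accumulator
def pvFieldKeysFrom (cards : List (List (String × List (String × String)))) (f : String)
    (s : PySem.Set String) : PySem.Set String :=
  cards.foldl (fun s card =>
    match pvLookup card f with
    | some d => PySem.Set.update s (d.map Prod.fst)
    | none => s) s

lemma pvStep_items (uf : PySem.Dict String (PySem.Set String))
    (card : List (String × List (String × String))) (s1 s2 s3 s4 : PySem.Set String)
    (h : uf = PySem.Dict.mk [("draw_methods", s1), ("seen_methods", s2),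
                             ("other_stats", s3), ("keep_rates", s4)]) :
    pvStepField (pvStepField (pvStepField (pvStepField uf card "draw_methods")
        card "seen_methods") card "other_stats") card "keep_rates" =
    PySem.Dict.mk [("draw_methods", pvFieldKeysFrom [card] "draw_methods" s1),
                   ("seen_methods", pvFieldKeysFrom [card] "seen_methods" s2),
                   ("other_stats", pvFieldKeysFrom [card] "other_stats" s3),
                   ("keep_rates", pvFieldKeysFrom [card] "keep_rates" s4)] := by
  subst h
  simp only [pvStepField, pvFieldKeysFrom, List.foldl]
  cases pvLookup card "draw_methods" <;> cases pvLookup card "seen_methods" <;>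
    cases pvLookup card "other_stats" <;> cases pvLookup card "keep_rates" <;> rfl

lemma pvLoopA (cards : List (List (String × List (String × String))))
    (s1 s2 s3 s4 : PySem.Set String) :
    cards.foldl (fun uf card =>
        pvStepField (pvStepField (pvStepField (pvStepField uf card "draw_methods")
          card "seen_methods") card "other_stats") card "keep_rates")
      (PySem.Dict.mk [("draw_methods", s1), ("seen_methods", s2),
                      ("other_stats", s3), ("keep_rates", s4)]) =
    PySem.Dict.mk [("draw_methods", pvFieldKeysFrom cards "draw_methods" s1),
                   ("seen_methods", pvFieldKeysFrom cards "seen_methods" s2),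
                   ("other_stats", pvFieldKeysFrom cards "other_stats" s3),
                   ("keep_rates", pvFieldKeysFrom cards "keep_rates" s4)] := by
  induction cards generalizing s1 s2 s3 s4 with
  | nil => rfl
  | cons card rest ih =>
      rw [List.foldl_cons, pvStep_items _ card s1 s2 s3 s4 rfl, ih]
      have hone : ∀ f s, pvFieldKeysFrom [card] f s =
          (match pvLookup card f with
           | some d => PySem.Set.update s (d.map Prod.fst)
           | none => s) := by intro f s; rfl
      have hsplit : ∀ f s, pvFieldKeysFrom (card :: rest) f s =
          pvFieldKeysFrom rest f (pvFieldKeysFrom [card] f s) := by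
        intro f s; simp [pvFieldKeysFrom, List.foldl_cons]
      rw [hsplit, hsplit, hsplit, hsplit]

-- A's per-field fold is a Set.update with the whole key stream
lemma pvFieldKeysFrom_eq_update (cards : List (List (String × List (String × String))))
    (f : String) (s : PySem.Set String) :
    pvFieldKeysFrom cards f s = PySem.Set.update s (pvKeyStream cards f) := by
  induction cards generalizing s with
  | nil => rfl
  | cons card rest ih =>
      simp only [pvFieldKeysFrom, List.foldl_cons, pvKeyStream, List.flatMap_cons,
        PySem.Set.update_append]
      cases h : pvLookup card f <;>
        simp only [pvKeysOf, h, PySem.Set.update_nil] <;> exact ih _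

-- filtering one field out of one card's pair chunk
lemma pvChunk_filter (card : List (String × List (String × String))) (g f : String) :
    (pvChunk card g).filter (fun p => p.1 == f) =
      if g = f then pvChunk card g else [] := by
  unfold pvChunk
  cases pvLookup card g with
  | none => simp
  | some d =>
      by_cases h : g = f
      · subst h; simp [List.filter_map, Function.comp_def]
      · simp [List.filter_map, Function.comp_def, h]

lemma pvChunk_eq_map (card : List (String × List (String × String))) (f : String) :
    pvChunk card f = (pvKeysOf card f).map (fun k => (f, k)) := by
  unfold pvChunk pvKeysOf
  cases pvLookup card f <;> simp

-- the f-filtered pair stream is the tagged key stream, for each of the four fields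
lemma pvStream_filter (cards : List (List (String × List (String × String))))
    (f : String) (hf : f ∈ pvFields) :
    (cards.flatMap (fun card => pvFields.flatMap (fun g => pvChunk card g))).filter
        (fun p => p.1 == f) =
      (pvKeyStream cards f).map (fun k => (f, k)) := by
  induction cards with
  | nil => rfl
  | cons card rest ih =>
      simp only [List.flatMap_cons, List.filter_append, ih, pvKeyStream, List.map_append]
      congr 1
      have : (pvFields.flatMap (fun g => pvChunk card g)).filter (fun p => p.1 == f) =
          pvChunk card f := by
        simp only [pvFields, List.mem_cons, List.not_mem_nil, or_false] at hf
        simp only [pvFields, List.flatMap_cons, List.flatMap_nil, List.append_nil,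
          List.filter_append, pvChunk_filter]
        rcases hf with h | h | h | h <;> subst h <;> simp
      rw [this, pvChunk_eq_map]

-- filter commutes with Set.add / Set.update / Set.ofList
lemma pvFilter_add {α : Type} [BEq α] [LawfulBEq α] (s : PySem.Set α) (x : α) (p : α → Bool) :
    (PySem.Set.add s x).filter p =
      if p x then PySem.Set.add (s.filter p) x else s.filter p := by
  rw [PySem.Set.add_eq_ite, PySem.Set.add_eq_ite]
  by_cases hx : x ∈ s
  · simp only [hx, if_true]
    by_cases hp : p x
    · simp [hp, List.mem_filter.mpr ⟨hx, hp⟩]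
    · simp [hp]
  · simp only [hx, if_false, List.filter_append]
    by_cases hp : p x
    · have : x ∉ s.filter p := fun h => hx (List.mem_filter.mp h).1
      simp [hp, this]
    · simp [hp]

lemma pvFilter_update {α : Type} [BEq α] [LawfulBEq α] (xs : List α) (s : PySem.Set α)
    (p : α → Bool) :
    (PySem.Set.update s xs).filter p = PySem.Set.update (s.filter p) (xs.filter p) := by
  induction xs generalizing s with
  | nil => rfl
  | cons x rest ih =>
      rw [PySem.Set.update_cons, ih, List.filter_cons, pvFilter_add]
      by_cases hp : p x
      · simp [hp, PySem.Set.update_cons]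
      · simp [hp]

lemma pvFilter_ofList {α : Type} [BEq α] [LawfulBEq α] (xs : List α) (p : α → Bool) :
    (PySem.Set.ofList xs).filter p = PySem.Set.ofList (xs.filter p) := by
  have h := pvFilter_update xs (PySem.Set.empty) p
  simpa [PySem.Set.update_empty] using h

-- ofList commutes with an injective map
lemma pvMap_add {α β : Type} [BEq α] [LawfulBEq α] [BEq β] [LawfulBEq β]
    (g : α → β) (hg : Function.Injective g) (s : PySem.Set α) (x : α) :
    (PySem.Set.add s x).map g = PySem.Set.add (s.map g) (g x) := by
  rw [PySem.Set.add_eq_ite, PySem.Set.add_eq_ite]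
  have hmem : g x ∈ s.map g ↔ x ∈ s := by
    constructor
    · intro h; rcases List.mem_map.mp h with ⟨y, hy, hgy⟩; rwa [← hg hgy]
    · intro h; exact List.mem_map.mpr ⟨x, h, rfl⟩
  by_cases hx : x ∈ s
  · simp [hx, hmem.mpr hx]
  · simp only [hx, if_false]
    have : g x ∉ List.map g s := fun h => hx (hmem.mp h)
    simp [this]

lemma pvMap_update {α β : Type} [BEq α] [LawfulBEq α] [BEq β] [LawfulBEq β]
    (g : α → β) (hg : Function.Injective g) (xs : List α) (s : PySem.Set α) :
    (PySem.Set.update s xs).map g = PySem.Set.update (s.map g) (xs.map g) := by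
  induction xs generalizing s with
  | nil => rfl
  | cons x rest ih =>
      rw [PySem.Set.update_cons, ih, List.map_cons, PySem.Set.update_cons, pvMap_add g hg]

lemma pvMap_ofList {α β : Type} [BEq α] [LawfulBEq α] [BEq β] [LawfulBEq β]
    (g : α → β) (hg : Function.Injective g) (xs : List α) :
    PySem.Set.ofList (xs.map g) = (PySem.Set.ofList xs).map g := by
  have h := pvMap_update g hg xs (PySem.Set.empty)
  simpa [PySem.Set.update_empty] using h.symm

-- B's set comprehension is the Set of the filtered, projected pairs
lemma pvGroup_eq (pairs : List (String × String)) (f : String) :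
    pvGroup pairs f =
      PySem.Set.ofList ((pairs.filter (fun p => p.1 == f)).map Prod.snd) := by
  unfold pvGroup
  rw [← PySem.Set.update_empty]
  generalize PySem.Set.empty = s
  induction pairs generalizing s with
  | nil => rfl
  | cons p rest ih =>
      rw [List.foldl_cons, List.filter_cons]
      by_cases hp : p.1 == f
      · simp only [hp, if_true, ih, List.map_cons, PySem.Set.update_cons]
      · simp only [hp, if_neg, Bool.false_eq_true, not_false_eq_true, ih]

-- per field: A's accumulated set equals B's group of the deduplicated pair stream
lemma pvField_eq (cards : List (List (String × List (String × String))))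
    (f : String) (hf : f ∈ pvFields) :
    pvFieldKeysFrom cards f PySem.Set.empty = pvGroup (pvPairs cards) f := by
  have hinj : Function.Injective (fun k : String => (f, k)) := by
    intro a b h; simpa using congrArg Prod.snd h
  rw [pvFieldKeysFrom_eq_update, PySem.Set.update_empty, pvGroup_eq, pvPairs,
    PySem.List.dedup_eq_ofList, pvFilter_ofList, pvStream_filter cards f hf,
    pvMap_ofList _ hinj]
  simp [List.map_map, Function.comp_def]

-- ===== VERDICT (by name: the statement is the Claim_ definition above) =====
theorem collect_all_unique_fields_spec : Claim_equal_collect_all_unique_fields := by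
  intro cards _
  show (cards.foldl (fun uf card =>
      pvStepField (pvStepField (pvStepField (pvStepField uf card "draw_methods")
        card "seen_methods") card "other_stats") card "keep_rates")
    (PySem.Dict.mk [("draw_methods", PySem.Set.empty), ("seen_methods", PySem.Set.empty),
                    ("other_stats", PySem.Set.empty), ("keep_rates", PySem.Set.empty)])).items =
    collect_all_unique_fields_alt cards
  rw [pvLoopA]
  show [("draw_methods", pvFieldKeysFrom cards "draw_methods" PySem.Set.empty),
        ("seen_methods", pvFieldKeysFrom cards "seen_methods" PySem.Set.empty),
        ("other_stats", pvFieldKeysFrom cards "other_stats" PySem.Set.empty),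
        ("keep_rates", pvFieldKeysFrom cards "keep_rates" PySem.Set.empty)] =
    collect_all_unique_fields_alt cards
  rw [pvField_eq cards "draw_methods" (by decide), pvField_eq cards "seen_methods" (by decide),
      pvField_eq cards "other_stats" (by decide), pvField_eq cards "keep_rates" (by decide)]
  rfl
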